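-- pv_equiv track=rewrite | github.com/jvtarazona/CleaningPics | repeatedChesumMd5.py | dict_compareBykey
-- ===== SOURCE A (Python) =====
-- def dict_compareBykey(d1, d2):
--     """Compare two dictionaries."""
--     d1_keys = set(d1.keys())
--     d2_keys = set(d2.keys())
--     shared_keys = d1_keys.intersection(d2_keys)
--     added = d1_keys - d2_keys
--     removed = d2_keys - d1_keys
--     modified = {o: (d1[o], d2[o]) for o in shared_keys if d1[o] != d2[o]}
--     same = set(o for o in shared_keys if d1[o] == d2[o])
--     return added, removed, modified, same
-- ===== SOURCE B (Python) =====
-- def dict_compareBykey(d1, d2):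
--     """Compare two dictionaries by first merging both into one table mapping
--     each key to its tagged value occurrences, then classifying every merged
--     entry by its shape (no key-set algebra, no lookups back into d1/d2)."""
--     merged = {}
--     for k, v in d1.items():
--         merged.setdefault(k, []).append((0, v))
--     for k, w in d2.items():
--         merged.setdefault(k, []).append((1, w))
--     added, removed, modified, same = set(), set(), {}, set()
--     for k, entries in merged.items():
--         if len(entries) == 2:
--             v, w = entries[0][1], entries[1][1]
--             if v == w:
--                 same.add(k)
--             else:
--                 modified[k] = (v, w)
--         elif entries[0][0] == 0:
--             added.add(k)
--         else:
--             removed.add(k)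
--     return added, removed, modified, same
-- ===== Notes on version B (the rewrite author's own statement) =====
-- stated objective: alternative
-- what changed: Instead of key-set intersection/differences with lookups back into d1/d2 (A) or a membership-classifying pass, B first merges both dicts into one table mapping each key to its list of (side, value) occurrences, then classifies each merged entry purely by the shape of that list (two entries -> same/modified by value equality, one entry -> added/removed by its side tag).
import Mathlib
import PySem

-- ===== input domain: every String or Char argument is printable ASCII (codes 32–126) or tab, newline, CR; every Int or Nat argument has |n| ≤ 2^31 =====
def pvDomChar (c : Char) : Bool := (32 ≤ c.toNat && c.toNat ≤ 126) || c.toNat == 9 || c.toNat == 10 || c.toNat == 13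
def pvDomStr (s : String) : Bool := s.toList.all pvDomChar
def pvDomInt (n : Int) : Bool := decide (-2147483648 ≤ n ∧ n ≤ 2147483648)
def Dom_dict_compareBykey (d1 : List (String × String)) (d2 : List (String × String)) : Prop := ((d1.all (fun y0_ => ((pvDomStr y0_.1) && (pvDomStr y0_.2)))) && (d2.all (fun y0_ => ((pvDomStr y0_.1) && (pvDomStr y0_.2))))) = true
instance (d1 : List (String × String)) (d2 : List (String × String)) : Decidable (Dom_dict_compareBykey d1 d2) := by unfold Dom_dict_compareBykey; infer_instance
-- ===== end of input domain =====

-- B replaces A's key-set algebra (intersection/differences plus lookup comprehensions) by merging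
-- both dicts into one key -> tagged-occurrence-list table and classifying each entry by its shape.


-- ===== PORT A =====
def dict_compareBykey (d1 : List (String × String)) (d2 : List (String × String)) : List String × List String × (List (String × String × String)) × List String :=
  let D1 : PySem.Dict String String := PySem.Dict.mk d1
  let D2 : PySem.Dict String String := PySem.Dict.mk d2
  let d1_keys : PySem.Set String := PySem.Set.ofList D1.keys
  let d2_keys : PySem.Set String := PySem.Set.ofList D2.keys
  let shared_keys := PySem.Set.inter d1_keys d2_keys
  let added := PySem.Set.diff d1_keys d2_keys
  let removed := PySem.Set.diff d2_keys d1_keys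
  let modified := shared_keys.filterMap (fun o =>
    if D1.getD o "" ≠ D2.getD o "" then some (o, D1.getD o "", D2.getD o "") else none)
  let same := PySem.Set.ofList (shared_keys.filter (fun o => D1.getD o "" == D2.getD o ""))
  (added, removed, modified, same)

-- ===== PORT B =====
-- the body of B's classification loop over merged.items; Python indexes entries[0]/entries[1],
-- which cannot fail (every merged entry list is nonempty), ported as pyGetD with an unreachable default
def pvClassify
    (acc : PySem.Set String × PySem.Set String × List (String × String × String) × PySem.Set String)
    (p : String × List (Int × String)) :
    PySem.Set String × PySem.Set String × List (String × String × String) × PySem.Set String :=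
  if p.2.length = 2 then
    let v := (PySem.List.pyGetD p.2 0 ((0 : Int), "")).2
    let w := (PySem.List.pyGetD p.2 1 ((0 : Int), "")).2
    if v == w then (acc.1, acc.2.1, acc.2.2.1, PySem.Set.add acc.2.2.2 p.1)
    else (acc.1, acc.2.1, acc.2.2.1 ++ [(p.1, v, w)], acc.2.2.2)
  else if (PySem.List.pyGetD p.2 0 ((0 : Int), "")).1 == 0 then
    (PySem.Set.add acc.1 p.1, acc.2.1, acc.2.2.1, acc.2.2.2)
  else
    (acc.1, PySem.Set.add acc.2.1 p.1, acc.2.2.1, acc.2.2.2)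

def dict_compareBykey_alt (d1 : List (String × String)) (d2 : List (String × String)) : List String × List String × (List (String × String × String)) × List String :=
  -- merged.setdefault(k, []).append((side, value))  ==  merged[k] = merged.get(k, []) + [(side, value)]
  let merged0 := d1.foldl (fun m p => m.modify p.1 [] (· ++ [((0 : Int), p.2)]))
    (PySem.Dict.empty : PySem.Dict String (List (Int × String)))
  let merged := d2.foldl (fun m p => m.modify p.1 [] (· ++ [((1 : Int), p.2)])) merged0
  merged.items.foldl pvClassify (PySem.Set.empty, PySem.Set.empty, [], PySem.Set.empty)

-- ===== PRECONDITION & SPEC =====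
-- The assoc lists encode Python dicts, whose keys are unique: a duplicate-keyed list
-- corresponds to no Python input of A, so Pre_ requires the keys of each list to be distinct.
def Pre_dict_compareBykey (d1 : List (String × String)) (d2 : List (String × String)) : Prop :=
  (d1.map Prod.fst).Nodup ∧ (d2.map Prod.fst).Nodup
instance (d1 : List (String × String)) (d2 : List (String × String)) : Decidable (Pre_dict_compareBykey d1 d2) := by unfold Pre_dict_compareBykey; infer_instance

def pvWitness_dict_compareBykey : (List (String × String)) × (List (String × String)) :=
  ([("a", "1"), ("b", "2")], [("b", "3"), ("c", "2")])

def Spec_dict_compareBykey (d1 : List (String × String)) (d2 : List (String × String)) (out : List String × List String × (List (String × String × String)) × List String) : Prop := out = dict_compareBykey_alt d1 d2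
instance (d1 : List (String × String)) (d2 : List (String × String)) (out : List String × List String × (List (String × String × String)) × List String) : Decidable (Spec_dict_compareBykey d1 d2 out) := by unfold Spec_dict_compareBykey; infer_instance

-- ===== CLAIM (what is proved, stated in full; the proofs are below) =====
def Claim_equal_dict_compareBykey : Prop := ∀ (d1 : List (String × String)) (d2 : List (String × String)), Dom_dict_compareBykey d1 d2 → Pre_dict_compareBykey d1 d2 → Spec_dict_compareBykey d1 d2 (dict_compareBykey d1 d2)

-- ===== LEMMAS AND PROOFS =====

-- the tail of a merged entry for a key of d1: d2's tagged value if present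
def pvRest (D2 : PySem.Dict String String) (c : String) : List (Int × String) :=
  match D2.get? c with
  | some w => [((1 : Int), w)]
  | none => []

-- in a Nodup-keyed assoc list, filtering by a member's key yields exactly that pair
theorem pvFilter_key_self (l : List (String × String)) (p : String × String)
    (hp : p ∈ l) (hl : (l.map Prod.fst).Nodup) :
    l.filter (fun q => q.1 == p.1) = [p] := by
  induction l with
  | nil => cases hp
  | cons x t ih =>
    simp only [List.map_cons, List.nodup_cons, List.mem_map] at hl
    rcases List.mem_cons.1 hp with hp | hp
    · subst hp  -- p = x
      have : t.filter (fun q => q.1 == p.1) = [] := by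
        apply List.filter_eq_nil_iff.2
        intro q hq
        simp only [beq_iff_eq]
        intro h
        exact hl.1 ⟨q, hq, h⟩
      simp [this]
    · have hx : (x.1 == p.1) = false := by
        simp only [beq_eq_false_iff_ne, ne_eq]
        intro h
        exact hl.1 ⟨p, hp, (h ▸ rfl)⟩
      simp [hx, ih hp hl.2]

theorem pvFilter_key_nil (l : List (String × String)) (c : String)
    (hc : c ∉ l.map Prod.fst) :
    l.filter (fun q => q.1 == c) = [] := by
  apply List.filter_eq_nil_iff.2
  intro q hq
  simp only [beq_iff_eq]
  intro h
  exact hc (List.mem_map.2 ⟨q, hq, h⟩)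

-- what B's classification fold does on the d1-part of merged.items
theorem pvClassify_L1_foldl (D2 : PySem.Dict String String) (l : List (String × String))
    (a r : PySem.Set String) (m : List (String × String × String)) (s : PySem.Set String)
    (hl : (l.map Prod.fst).Nodup)
    (ha : ∀ p ∈ l, p.1 ∉ a) (hs : ∀ p ∈ l, p.1 ∉ s) :
    l.foldl (fun acc p => pvClassify acc (p.1, ((0 : Int), p.2) :: pvRest D2 p.1)) (a, r, m, s) =
      (a ++ (l.filter (fun p => !D2.contains p.1)).map Prod.fst,
       r,
       m ++ l.filterMap (fun p =>
          match D2.get? p.1 with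
          | some w => if p.2 ≠ w then some (p.1, p.2, w) else none
          | none => none),
       s ++ (l.filter (fun p =>
          match D2.get? p.1 with
          | some w => p.2 == w
          | none => false)).map Prod.fst) := by
  induction l generalizing a r m s with
  | nil => simp
  | cons p t ih =>
    simp only [List.map_cons, List.nodup_cons, List.mem_map] at hl
    have hpt : ∀ q ∈ t, q.1 ≠ p.1 := by
      intro q hq hne
      exact hl.1 ⟨q, hq, hne⟩
    have hcont : D2.contains p.1 = (D2.get? p.1).isSome := PySem.Dict.contains_eq_isSome_get? ..
    simp only [List.foldl_cons]
    rcases h : D2.get? p.1 with _ | w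
    · -- key absent from d2: entry [(0, v)] → added
      have hstep : pvClassify (a, r, m, s) (p.1, ((0 : Int), p.2) :: pvRest D2 p.1)
          = (a ++ [p.1], r, m, s) := by
        simp [pvClassify, pvRest, h, PySem.List.pyGetD, PySem.List.pyGet?, PySem.List.pyIdx?,
          PySem.Set.add_of_not_mem (ha p (by simp))]
      rw [hstep, ih _ _ _ _ hl.2
        (by intro q hq; simp [ha q (List.mem_cons_of_mem _ hq), hpt q hq])
        (by intro q hq; exact hs q (List.mem_cons_of_mem _ hq))]
      simp [h, hcont]
    · rcases eq_or_ne p.2 w with hv | hv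
      · -- equal values: entry [(0, v), (1, v)] → same
        have hstep : pvClassify (a, r, m, s) (p.1, ((0 : Int), p.2) :: pvRest D2 p.1)
            = (a, r, m, s ++ [p.1]) := by
          simp [pvClassify, pvRest, h, hv, PySem.List.pyGetD, PySem.List.pyGet?, PySem.List.pyIdx?,
            PySem.Set.add_of_not_mem (hs p (by simp))]
        rw [hstep, ih _ _ _ _ hl.2
          (by intro q hq; exact ha q (List.mem_cons_of_mem _ hq))
          (by intro q hq; simp [hs q (List.mem_cons_of_mem _ hq), hpt q hq])]
        simp [h, hcont, hv]
      · -- different values: entry [(0, v), (1, w)] → modified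
        have hstep : pvClassify (a, r, m, s) (p.1, ((0 : Int), p.2) :: pvRest D2 p.1)
            = (a, r, m ++ [(p.1, p.2, w)], s) := by
          simp [pvClassify, pvRest, h, hv, PySem.List.pyGetD, PySem.List.pyGet?, PySem.List.pyIdx?]
        rw [hstep, ih _ _ _ _ hl.2
          (by intro q hq; exact ha q (List.mem_cons_of_mem _ hq))
          (by intro q hq; exact hs q (List.mem_cons_of_mem _ hq))]
        simp [h, hcont, hv]

-- what B's classification fold does on the d2-only part of merged.items
theorem pvClassify_L2_foldl (l : List (String × String))
    (a r : PySem.Set String) (m : List (String × String × String)) (s : PySem.Set String)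
    (hl : (l.map Prod.fst).Nodup) (hr : ∀ p ∈ l, p.1 ∉ r) :
    l.foldl (fun acc p => pvClassify acc (p.1, [((1 : Int), p.2)])) (a, r, m, s) =
      (a, r ++ l.map Prod.fst, m, s) := by
  induction l generalizing r with
  | nil => simp
  | cons p t ih =>
    simp only [List.map_cons, List.nodup_cons, List.mem_map] at hl
    have hpt : ∀ q ∈ t, q.1 ≠ p.1 := fun q hq hne => hl.1 ⟨q, hq, hne⟩
    have hstep : pvClassify (a, r, m, s) (p.1, [((1 : Int), p.2)])
        = (a, r ++ [p.1], m, s) := by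
      simp [pvClassify, PySem.List.pyGetD, PySem.List.pyGet?, PySem.List.pyIdx?,
        PySem.Set.add_of_not_mem (hr p (by simp))]
    simp only [List.foldl_cons]
    rw [hstep, ih _ hl.2
      (by intro q hq; simp [hr q (List.mem_cons_of_mem _ hq), hpt q hq])]
    simp

-- d2's tagged occurrences for a key, as a filter of d2
theorem pvRest_eq (d2 : List (String × String)) (c : String)
    (nd2 : (d2.map Prod.fst).Nodup) :
    (d2.filter (fun q => q.1 == c)).map (fun q => ((1 : Int), q.2)) = pvRest (PySem.Dict.mk d2) c := by
  rcases h : (PySem.Dict.mk d2).get? c with _ | w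
  · have hc : c ∉ d2.map Prod.fst := by
      have := PySem.Dict.get?_eq_none_iff_not_mem_keys (d := PySem.Dict.mk d2) (k := c)
      simp only [PySem.Dict.keys] at this
      exact this.1 h
    rw [pvFilter_key_nil d2 c hc]
    simp [pvRest, h]
  · have hm : (c, w) ∈ d2 := PySem.Dict.mem_items_of_get?_eq_some _ h
    rw [pvFilter_key_self d2 (c, w) hm nd2]
    simp [pvRest, h]

-- the merged table's items, characterised under Nodup keys
theorem pvMerged_items (d1 d2 : List (String × String))
    (nd1 : (d1.map Prod.fst).Nodup) (nd2 : (d2.map Prod.fst).Nodup) :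
    (d2.foldl (fun m p => m.modify p.1 [] (· ++ [((1 : Int), p.2)]))
      (d1.foldl (fun m p => m.modify p.1 [] (· ++ [((0 : Int), p.2)]))
        (PySem.Dict.empty : PySem.Dict String (List (Int × String))))).items =
      d1.map (fun p => (p.1, ((0 : Int), p.2) :: pvRest (PySem.Dict.mk d2) p.1)) ++
      (d2.filter (fun q => !PySem.Set.contains (d1.map Prod.fst) q.1)).map
        (fun q => (q.1, [((1 : Int), q.2)])) := by
  have hT : (d2.foldl (fun m p => m.modify p.1 [] (· ++ [((1 : Int), p.2)]))
      (d1.foldl (fun m p => m.modify p.1 [] (· ++ [((0 : Int), p.2)]))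
        (PySem.Dict.empty : PySem.Dict String (List (Int × String))))) =
      ((d1.map (fun p => (p.1, ((0 : Int), p.2))) ++ d2.map (fun p => (p.1, ((1 : Int), p.2)))).foldl
        (fun m q => m.modify q.1 [] (· ++ [q.2])) PySem.Dict.empty) := by
    rw [List.foldl_append, List.foldl_map, List.foldl_map]
  rw [hT]
  set T := d1.map (fun p => (p.1, ((0 : Int), p.2))) ++ d2.map (fun p => (p.1, ((1 : Int), p.2))) with hTdef
  set M := T.foldl (fun m q => m.modify q.1 [] (· ++ [q.2]))
    (PySem.Dict.empty : PySem.Dict String (List (Int × String))) with hMdef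
  have hkeys : M.keys = (d1.map Prod.fst) ++
      (d2.map Prod.fst).filter (fun y => !PySem.Set.contains (d1.map Prod.fst) y) := by
    rw [hMdef, PySem.Dict.keys_foldl_modify_key T Prod.fst [] (fun _ q => (· ++ [q.2])) _]
    have hTk : T.map Prod.fst = d1.map Prod.fst ++ d2.map Prod.fst := by
      simp only [hTdef, List.map_append, List.map_map]
      rfl
    rw [hTk]
    show PySem.Set.update (PySem.Dict.empty :
      PySem.Dict String (List (Int × String))).keys (d1.map Prod.fst ++ d2.map Prod.fst) = _
    rw [PySem.Dict.keys_empty, PySem.Set.update_nil_left, PySem.Set.ofList_append,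
      PySem.Set.ofList_eq_self_of_nodup _ nd1, PySem.Set.update_eq_append_filter,
      PySem.Set.ofList_eq_self_of_nodup _ nd2]
  have hnodup : M.keys.Nodup := by
    rw [hMdef]
    exact PySem.Dict.nodup_keys_foldl_modify_key T Prod.fst [] (fun _ q => (· ++ [q.2])) _
      (by rw [PySem.Dict.keys_empty]; exact List.nodup_nil)
  have hgetD : ∀ c, M.getD c [] =
      ((d1.filter (fun q => q.1 == c)).map (fun q => ((0 : Int), q.2))) ++
      ((d2.filter (fun q => q.1 == c)).map (fun q => ((1 : Int), q.2))) := by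
    intro c
    rw [hMdef, PySem.Dict.getD_foldl_modify_append, PySem.Dict.getD_empty]
    simp only [hTdef, List.filter_append, List.filter_map, List.map_append, List.map_map,
      List.nil_append]
    rfl
  rw [PySem.Dict.items_eq_map_keys M hnodup [], hkeys, List.map_append]
  congr 1
  · rw [List.map_map]
    apply List.map_congr_left
    intro p hp
    simp only [Function.comp_apply]
    rw [hgetD p.1, pvFilter_key_self d1 p hp nd1, pvRest_eq d2 p.1 nd2]
    rfl
  · have hf : (d2.map Prod.fst).filter (fun y => !PySem.Set.contains (d1.map Prod.fst) y)
        = (d2.filter (fun q => !PySem.Set.contains (d1.map Prod.fst) q.1)).map Prod.fst := by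
      rw [List.filter_map]
      rfl
    rw [hf, List.map_map]
    apply List.map_congr_left
    intro q hq
    have hq1 : q ∈ d2 := List.mem_of_mem_filter hq
    have hnc : q.1 ∉ d1.map Prod.fst := by
      have := List.of_mem_filter hq
      simp only [Bool.not_eq_true'] at this
      intro hmem
      rw [(PySem.Set.contains_iff (s := d1.map Prod.fst) (x := q.1)).2 hmem] at this
      cases this
    simp only [Function.comp_apply]
    rw [hgetD q.1, pvFilter_key_nil d1 q.1 hnc, pvFilter_key_self d2 q hq1 nd2]
    rfl

-- ===== VERDICT (by name: the statement is the Claim_ definition above) =====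
theorem dict_compareBykey_spec : Claim_equal_dict_compareBykey := by
  intro d1 d2 _ hpre
  obtain ⟨nd1, nd2⟩ := hpre
  unfold Spec_dict_compareBykey dict_compareBykey dict_compareBykey_alt
  dsimp only
  rw [pvMerged_items d1 d2 nd1 nd2, List.foldl_append, List.foldl_map, List.foldl_map]
  have hfk : ((d2.filter (fun q => !PySem.Set.contains (d1.map Prod.fst) q.1)).map
      Prod.fst).Nodup := nd2.sublist (List.Sublist.map _ List.filter_sublist)
  rw [pvClassify_L1_foldl (PySem.Dict.mk d2) d1 PySem.Set.empty PySem.Set.empty [] PySem.Set.empty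
      nd1 (by simp [PySem.Set.empty]) (by simp [PySem.Set.empty]),
    pvClassify_L2_foldl _ _ _ _ _ hfk (by simp [PySem.Set.empty])]
  have hkeys1 : (PySem.Dict.mk d1).keys = d1.map Prod.fst := rfl
  have hkeys2 : (PySem.Dict.mk d2).keys = d2.map Prod.fst := rfl
  have hc1 : ∀ k, PySem.Set.contains (d1.map Prod.fst) k = (PySem.Dict.mk d1).contains k := by
    intro k; simp [pysem, PySem.Dict.contains_eq_decide_mem_keys]
  have hc2 : ∀ k, PySem.Set.contains (d2.map Prod.fst) k = (PySem.Dict.mk d2).contains k := by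
    intro k; simp [pysem, PySem.Dict.contains_eq_decide_mem_keys]
  have hg1 : ∀ p ∈ d1, (PySem.Dict.mk d1).getD p.1 "" = p.2 := by
    intro p hp
    exact PySem.Dict.getD_of_mem_items (d := PySem.Dict.mk d1) (by exact hp) nd1 ..
  simp only [hkeys1, hkeys2, PySem.Set.ofList_eq_self_of_nodup _ nd1,
    PySem.Set.ofList_eq_self_of_nodup _ nd2, PySem.Set.empty, List.nil_append,
    PySem.Set.diff, PySem.Set.inter, Prod.mk.injEq]
  have hinter : (d1.map Prod.fst).filter (fun x => PySem.Set.contains (d2.map Prod.fst) x)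
      = (d1.filter (fun p => (PySem.Dict.mk d2).contains p.1)).map Prod.fst := by
    rw [List.filter_map]
    exact congrArg _ (List.filter_congr (fun p _ => hc2 p.1))
  refine ⟨?_, ?_, ?_, ?_⟩
  · -- added
    rw [List.filter_map]
    exact congrArg _ (List.filter_congr (fun p _ => by simp [← hc2 p.1]))
  · -- removed
    rw [List.filter_map]
    exact congrArg _ (List.filter_congr (fun p _ => by simp))
  · -- modified
    rw [hinter, List.filterMap_map, List.filterMap_filter]
    refine List.filterMap_congr ?_
    intro p hp
    rcases h2 : (PySem.Dict.mk d2).get? p.1 with _ | w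
    · have hcf : (PySem.Dict.mk d2).contains p.1 = false := by
        rw [PySem.Dict.contains_eq_isSome_get?, h2]; rfl
      simp [hcf]
    · have hct : (PySem.Dict.mk d2).contains p.1 = true := by
        rw [PySem.Dict.contains_eq_isSome_get?, h2]; rfl
      have hgd2 : (PySem.Dict.mk d2).getD p.1 "" = w := by
        rw [PySem.Dict.getD_eq_get?_getD, h2]; rfl
      simp [hct, Function.comp, hg1 p hp, hgd2]
  · -- same
    rw [hinter, List.filter_map, List.filter_filter]
    have hnodup : ((d1.filter (fun a =>
        ((fun o => (PySem.Dict.mk d1).getD o "" == (PySem.Dict.mk d2).getD o "") ∘ Prod.fst) a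
          && (PySem.Dict.mk d2).contains a.1)).map Prod.fst).Nodup :=
      nd1.sublist (List.Sublist.map _ List.filter_sublist)
    rw [PySem.Set.ofList_eq_self_of_nodup _ hnodup]
    refine congrArg _ (List.filter_congr ?_)
    intro p hp
    rcases h2 : (PySem.Dict.mk d2).get? p.1 with _ | w
    · have hcf : (PySem.Dict.mk d2).contains p.1 = false := by
        rw [PySem.Dict.contains_eq_isSome_get?, h2]; rfl
      simp [hcf, Function.comp]
    · have hct : (PySem.Dict.mk d2).contains p.1 = true := by
        rw [PySem.Dict.contains_eq_isSome_get?, h2]; rfl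
      have hgd2 : (PySem.Dict.mk d2).getD p.1 "" = w := by
        rw [PySem.Dict.getD_eq_get?_getD, h2]; rfl
      simp [hct, Function.comp, hg1 p hp, hgd2]
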